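-- pv_equiv track=rewrite | github.com/MeggieRong/refundWarehouseBusinessRecurrence | origScript/b2bNormal.py | countSkuNum
-- ===== SOURCE A (Python) =====
-- def countSkuNum(arr):
--     SKuCount = 0
--     countTemp = {}
--     for d in arr:
--         for k, v in d.items():
--             countTemp.setdefault(k, set()).add(v)
--             if 'sku' in countTemp.keys():
--                 SKuCount = (len(countTemp['sku']))
--     return SKuCount
-- ===== SOURCE B (Python) =====
-- def countSkuNum(arr):
--     skus = set()
--     for d in arr:
--         if 'sku' in d:
--             skus.add(d['sku'])
--     return len(skus)
-- ===== Notes on version B (the rewrite author's own statement) =====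
-- stated objective: simpler
-- what changed: B maintains a single set of sku values with one 'sku' lookup per dict instead of A's dict-of-sets index over every key with a per-item len recomputation.
import Mathlib
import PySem

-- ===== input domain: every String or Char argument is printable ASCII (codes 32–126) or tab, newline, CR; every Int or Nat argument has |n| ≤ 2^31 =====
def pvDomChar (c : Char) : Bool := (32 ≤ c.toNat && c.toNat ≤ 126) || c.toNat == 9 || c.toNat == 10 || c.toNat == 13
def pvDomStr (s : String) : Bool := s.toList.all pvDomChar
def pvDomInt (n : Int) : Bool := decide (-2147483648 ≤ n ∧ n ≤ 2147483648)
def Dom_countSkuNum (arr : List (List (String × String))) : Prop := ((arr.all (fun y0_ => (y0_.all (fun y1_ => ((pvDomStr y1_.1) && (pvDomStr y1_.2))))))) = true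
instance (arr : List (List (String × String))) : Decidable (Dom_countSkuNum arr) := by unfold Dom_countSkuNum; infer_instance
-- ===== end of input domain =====

-- B replaces A's dict-of-sets index over every key (with a per-item len recomputation)
-- by a single set of sku values, one lookup per dict: simpler and one pass over the dicts.


-- ===== PORT A =====
-- one inner-loop step of A: countTemp.setdefault(k, set()).add(v) (= modify with default empty set),
-- then if 'sku' in countTemp.keys(): SKuCount = len(countTemp['sku']) (lookup guarded by the contains test, so getD is exact)
def skuStepA (st : Int × PySem.Dict String (PySem.Set String)) (kv : String × String) :
    Int × PySem.Dict String (PySem.Set String) :=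
  let ct := st.2.modify kv.1 PySem.Set.empty (fun s => PySem.Set.add s kv.2)
  if ct.contains "sku" then (PySem.Set.len (ct.getD "sku" PySem.Set.empty), ct) else (st.1, ct)

def countSkuNum (arr : List (List (String × String))) : Int :=
  (arr.foldl (fun st d => d.foldl skuStepA st) ((0 : Int), PySem.Dict.empty)).1

-- ===== PORT B =====
-- one step of B: if 'sku' in d: skus.add(d['sku'])
def skuStepB (s : PySem.Set String) (d : List (String × String)) : PySem.Set String :=
  match (PySem.Dict.mk d).get? "sku" with
  | some v => PySem.Set.add s v
  | none => s

def countSkuNum_alt (arr : List (List (String × String))) : Int :=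
  PySem.Set.len (arr.foldl skuStepB PySem.Set.empty)

-- ===== PRECONDITION & SPEC =====
-- Each element of arr stands for a Python dict, which cannot have duplicate keys; Pre_ admits exactly
-- the association lists that encode dicts (no inner list repeats a key). It excludes no Python input of A.
def Pre_countSkuNum (arr : List (List (String × String))) : Prop :=
  ∀ d ∈ arr, (d.map Prod.fst).Nodup
instance (arr : List (List (String × String))) : Decidable (Pre_countSkuNum arr) := by
  unfold Pre_countSkuNum; infer_instance
def pvWitness_countSkuNum : (List (List (String × String))) :=
  [[("sku", "a"), ("x", "b")], [("sku", "c")], [("y", "z")]]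

def Spec_countSkuNum (arr : List (List (String × String))) (out : Int) : Prop := out = countSkuNum_alt arr
instance (arr : List (List (String × String))) (out : Int) : Decidable (Spec_countSkuNum arr out) := by unfold Spec_countSkuNum; infer_instance

-- ===== CLAIM (what is proved, stated in full; the proofs are below) =====
def Claim_equal_countSkuNum : Prop := ∀ (arr : List (List (String × String))), Dom_countSkuNum arr → Pre_countSkuNum arr → Spec_countSkuNum arr (countSkuNum arr)

-- ===== LEMMAS AND PROOFS =====

-- the dict component of A's fold ignores the counter component
def skuStepD (t : PySem.Dict String (PySem.Set String)) (kv : String × String) :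
    PySem.Dict String (PySem.Set String) :=
  t.modify kv.1 PySem.Set.empty (fun s => PySem.Set.add s kv.2)

theorem snd_foldl_skuStepA (l : List (String × String))
    (st : Int × PySem.Dict String (PySem.Set String)) :
    (l.foldl skuStepA st).2 = l.foldl skuStepD st.2 := by
  induction l generalizing st with
  | nil => rfl
  | cons p l ih =>
      rw [List.foldl_cons, List.foldl_cons, ih]
      congr 1
      simp only [skuStepA, skuStepD]
      split <;> rfl

-- A's invariant: the counter always equals the size of the current sku set
theorem fst_foldl_skuStepA (l : List (String × String))
    (st : Int × PySem.Dict String (PySem.Set String))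
    (h : st.1 = PySem.Set.len (st.2.getD "sku" PySem.Set.empty)) :
    (l.foldl skuStepA st).1 =
      PySem.Set.len ((l.foldl skuStepA st).2.getD "sku" PySem.Set.empty) := by
  induction l generalizing st with
  | nil => exact h
  | cons p l ih =>
      rw [List.foldl_cons]
      apply ih
      simp only [skuStepA]
      split
      · rfl
      · rename_i hc
        simp only [Bool.not_eq_true, PySem.Dict.contains_modify, Bool.or_eq_false_iff] at hc
        rw [h, PySem.Dict.getD_of_not_contains _ _ hc.2,
          PySem.Dict.getD_of_not_contains _ _
            (by rw [PySem.Dict.contains_modify, hc.1, hc.2]; rfl)]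

-- the sku entry of the dict built by A's loop collects exactly the values keyed "sku", in order
theorem getD_foldl_skuStepD (l : List (String × String))
    (t : PySem.Dict String (PySem.Set String)) :
    (l.foldl skuStepD t).getD "sku" PySem.Set.empty =
      ((l.filter (fun p => p.1 == "sku")).map Prod.snd).foldl PySem.Set.add
        (t.getD "sku" PySem.Set.empty) := by
  induction l generalizing t with
  | nil => rfl
  | cons p l ih =>
      rw [List.foldl_cons, ih, List.filter_cons]
      by_cases hk : p.1 = "sku"
      · simp only [skuStepD, hk, beq_self_eq_true, if_pos, List.map_cons, List.foldl_cons,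
          PySem.Dict.getD_modify]
      · have hb : (p.1 == "sku") = false := beq_eq_false_iff_ne.mpr hk
        simp only [skuStepD, hb, if_neg Bool.false_ne_true,
          PySem.Dict.getD_modify, if_neg (Ne.symm hk)]

-- no "sku" key in an association list → no pair survives the filter
theorem filter_sku_eq_nil (d : List (String × String))
    (h : "sku" ∉ d.map Prod.fst) : d.filter (fun p => p.1 == "sku") = [] := by
  induction d with
  | nil => rfl
  | cons p d ih =>
      simp only [List.map_cons, List.mem_cons, not_or] at h
      rw [List.filter_cons, if_neg (by simp [beq_eq_false_iff_ne.mpr (fun he => h.1 he.symm)])]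
      exact ih h.2

-- with unique keys, the filtered sku values are exactly the dict lookup's result
theorem filter_sku_of_nodup (d : List (String × String))
    (h : (d.map Prod.fst).Nodup) :
    (d.filter (fun p => p.1 == "sku")).map Prod.snd =
      match (PySem.Dict.mk d).get? "sku" with
      | some v => [v]
      | none => [] := by
  induction d with
  | nil => rfl
  | cons p d ih =>
      simp only [List.map_cons, List.nodup_cons] at h
      rw [List.filter_cons, PySem.Dict.get?_mk_cons]
      by_cases hk : p.1 = "sku"
      · rw [if_pos (by simp [hk]), if_pos (by simp [hk]), List.map_cons,
          filter_sku_eq_nil d (hk ▸ h.1)]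
        rfl
      · have hb : (p.1 == "sku") = false := beq_eq_false_iff_ne.mpr hk
        rw [if_neg (by simp [hb]), if_neg (by simp [hb])]
        exact ih h.2

-- folding the sku values of all dicts into a set = B's per-dict loop
theorem foldl_add_eq_foldl_skuStepB (arr : List (List (String × String)))
    (s : PySem.Set String) (h : ∀ d ∈ arr, (d.map Prod.fst).Nodup) :
    ((arr.flatten.filter (fun p => p.1 == "sku")).map Prod.snd).foldl PySem.Set.add s =
      arr.foldl skuStepB s := by
  induction arr generalizing s with
  | nil => rfl
  | cons d arr ih =>
      rw [List.flatten_cons, List.filter_append, List.map_append, List.foldl_append,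
        List.foldl_cons, ih _ (fun d' hd' => h d' (List.mem_cons_of_mem _ hd'))]
      congr 1
      rw [filter_sku_of_nodup d (h d List.mem_cons_self)]
      simp only [skuStepB]
      split <;> rfl

-- ===== VERDICT (by name: the statement is the Claim_ definition above) =====
theorem countSkuNum_spec : Claim_equal_countSkuNum := by
  intro arr _ hpre
  unfold Spec_countSkuNum countSkuNum countSkuNum_alt
  rw [← List.foldl_flatten (f := skuStepA),
    fst_foldl_skuStepA _ _ rfl, snd_foldl_skuStepA, getD_foldl_skuStepD]
  rw [PySem.Dict.getD_empty, foldl_add_eq_foldl_skuStepB arr _ hpre]
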